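-- pv_equiv track=rewrite | github.com/Fondamenti18/fondamenti-di-programmazione | students/1802232/homework04/program01.py | prova22
-- ===== SOURCE A (Python) =====
-- def prova22(file,dizionario,grado,antenati,radice):
--     if len(file[radice]) == grado:
--         for chiave in file[radice]:
--                 dizionario[chiave] = antenati+1
--         antenati += 1
--         for chiave in file[radice]:
--             dizionario = prova22(file,dizionario,grado,antenati,chiave)
--     else:
--         for chiave in file[radice]:
--             dizionario[chiave] = antenati
--             dizionario = prova22(file,dizionario,grado,antenati,chiave)
--     return dizionario
-- ===== SOURCE B (Python) =====
-- def prova22(file, dizionario, grado, antenati, radice):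
--     # Iterative DFS replacing A's recursion: an explicit stack of tasks
--     # ("expand" a node at a depth / "write" one dict entry), popped LIFO so
--     # that dict writes happen in exactly the same order as A's recursion.
--     stack = [("expand", radice, antenati)]
--     while stack:
--         kind, node, depth = stack.pop()
--         if kind == "write":
--             dizionario[node] = depth
--             continue
--         children = file[node]
--         if len(children) == grado:
--             for child in children:
--                 dizionario[child] = depth + 1
--             stack.extend(("expand", child, depth + 1) for child in reversed(children))
--         else:
--             for child in reversed(children):
--                 stack.append(("expand", child, depth))
--                 stack.append(("write", child, depth))
--     return dizionario
-- ===== Notes on version B (the rewrite author's own statement) =====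
-- stated objective: alternative
-- what changed: A's self-recursive DFS is replaced by an iterative while-loop over an explicit LIFO stack of (expand-node / write-entry) tasks that performs the identical sequence of dict writes without Python recursion.
import Mathlib
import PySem

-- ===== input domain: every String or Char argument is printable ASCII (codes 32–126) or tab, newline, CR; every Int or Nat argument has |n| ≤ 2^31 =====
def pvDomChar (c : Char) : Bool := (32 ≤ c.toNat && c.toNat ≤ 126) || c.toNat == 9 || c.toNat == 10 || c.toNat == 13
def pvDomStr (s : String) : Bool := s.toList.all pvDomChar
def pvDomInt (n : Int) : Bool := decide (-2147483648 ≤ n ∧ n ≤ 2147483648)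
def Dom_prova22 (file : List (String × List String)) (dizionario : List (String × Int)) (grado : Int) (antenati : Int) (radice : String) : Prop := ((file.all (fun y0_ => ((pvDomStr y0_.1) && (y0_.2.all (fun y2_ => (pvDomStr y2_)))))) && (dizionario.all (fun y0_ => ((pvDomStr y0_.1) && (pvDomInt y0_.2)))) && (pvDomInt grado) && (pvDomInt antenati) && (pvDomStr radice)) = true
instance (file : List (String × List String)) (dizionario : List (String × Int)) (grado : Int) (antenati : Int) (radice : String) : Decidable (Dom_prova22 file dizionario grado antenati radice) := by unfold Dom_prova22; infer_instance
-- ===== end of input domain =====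

-- B replaces A's recursion by an iterative DFS over an explicit LIFO task stack
-- ("expand node" / "write one dict entry") producing the very same sequence of
-- dict writes (objective: alternative).  Both A and B mutate `dizionario` in
-- place in Python and return it; the equivalence proved here is about the
-- returned dict (which is that same mutated object in both).

-- ===== PORT A =====
-- A's recursion cannot be proved terminating on arbitrary graphs (Python
-- overflows the stack on a cycle), so the port carries a fuel parameter;
-- on Pre_prova22 inputs (reachable part acyclic) the fuel
-- (total number of children + 2) provably exceeds every recursion depth.
def prova22Rec (file : PySem.Dict String (List String)) (grado : Int) :
    Nat → PySem.Dict String Int → Int → String → PySem.Dict String Int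
  | 0, d, _, _ => d
  | f+1, d, antenati, radice =>
    match file.get? radice with
    | none => d            -- KeyError in Python; excluded by Pre_prova22
    | some kids =>
      if (kids.length : Int) = grado then
        kids.foldl (fun d c => prova22Rec file grado f d (antenati+1) c)
          (kids.foldl (fun d c => d.insert c (antenati+1)) d)
      else
        kids.foldl (fun d c => prova22Rec file grado f (d.insert c antenati) antenati c) d

def prova22 (file : List (String × List String)) (dizionario : List (String × Int)) (grado : Int) (antenati : Int) (radice : String) : List (String × Int) :=
  (prova22Rec (PySem.Dict.mk file) grado ((file.map (fun p => p.2.length)).sum + 2)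
    (PySem.Dict.mk dizionario) antenati radice).items

-- ===== PORT B =====
inductive PvTask where
  | expand : String → Int → PvTask
  | write : String → Int → PvTask
deriving Repr, DecidableEq

-- exact number of loop iterations B's while-loop performs (used only as the
-- fuel of the loop's port; Source B's while-loop needs none)
def pvCost (file : PySem.Dict String (List String)) (grado : Int) : Nat → String → Nat
  | 0, _ => 1
  | f+1, n =>
    match file.get? n with
    | none => 1
    | some kids =>
      if (kids.length : Int) = grado then 1 + (kids.map (pvCost file grado f)).sum
      else 1 + (kids.map (fun c => 1 + pvCost file grado f c)).sum

def prova22Loop (file : PySem.Dict String (List String)) (grado : Int) :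
    Nat → List PvTask → PySem.Dict String Int → PySem.Dict String Int
  | 0, _, d => d
  | _+1, [], d => d
  | f+1, PvTask.write n v :: rest, d => prova22Loop file grado f rest (d.insert n v)
  | f+1, PvTask.expand n depth :: rest, d =>
    match file.get? n with
    | none => d            -- KeyError in Python; excluded by Pre_prova22
    | some kids =>
      if (kids.length : Int) = grado then
        prova22Loop file grado f (kids.foldr (fun c s => PvTask.expand c (depth+1) :: s) rest)
          (kids.foldl (fun d c => d.insert c (depth+1)) d)
      else
        prova22Loop file grado f
          (kids.foldr (fun c s => PvTask.write c depth :: PvTask.expand c depth :: s) rest) d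

def prova22_alt (file : List (String × List String)) (dizionario : List (String × Int)) (grado : Int) (antenati : Int) (radice : String) : List (String × Int) :=
  (prova22Loop (PySem.Dict.mk file) grado
    (pvCost (PySem.Dict.mk file) grado ((file.map (fun p => p.2.length)).sum + 2) radice + 1)
    [PvTask.expand radice antenati] (PySem.Dict.mk dizionario)).items

-- ===== PRECONDITION & SPEC =====
-- graph helpers for Pre_: one closure step adds the children of every member
-- that is a key; pvClosure iterates it to saturation (a generic reachability
-- computation on the input graph, independent of what the programs compute)
def pvStep (file : List (String × List String)) (S : PySem.Set String) : PySem.Set String :=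
  PySem.Set.update S ((file.filter (fun p => PySem.Set.contains S p.1)).map Prod.snd).flatten

def pvClosure (file : List (String × List String)) (S : PySem.Set String) : PySem.Set String :=
  (pvStep file)^[((file.map Prod.snd).flatten).length + 1] S

-- the nodes reachable from radice / strictly below n
def pvReach (file : List (String × List String)) (radice : String) : PySem.Set String :=
  pvClosure file (PySem.Set.ofList [radice])

def pvDesc (file : List (String × List String)) (n : String) : PySem.Set String :=
  pvClosure file (PySem.Set.ofList (((PySem.Dict.mk file).get? n).getD []))

-- Pre_ is exactly A's domain: A raises KeyError when a node reachable from the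
-- root is not a key, and RecursionError when a reachable node lies on a cycle
-- (i.e. is its own strict descendant); on every other input A returns.
def Pre_prova22 (file : List (String × List String)) (dizionario : List (String × Int)) (grado : Int) (antenati : Int) (radice : String) : Prop :=
  radice ∈ file.map Prod.fst ∧
  (∀ n ∈ pvReach file radice, n ∈ file.map Prod.fst) ∧
  (∀ n ∈ pvReach file radice, n ∉ pvDesc file n)
instance (file : List (String × List String)) (dizionario : List (String × Int)) (grado : Int) (antenati : Int) (radice : String) : Decidable (Pre_prova22 file dizionario grado antenati radice) := by unfold Pre_prova22; infer_instance

def pvWitness_prova22 : (List (String × List String)) × (List (String × Int)) × Int × Int × String :=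
  ([("r", ["a", "b"]), ("a", []), ("b", [])], [("a", 7)], 2, 0, "r")

def Spec_prova22 (file : List (String × List String)) (dizionario : List (String × Int)) (grado : Int) (antenati : Int) (radice : String) (out : List (String × Int)) : Prop := out = prova22_alt file dizionario grado antenati radice
instance (file : List (String × List String)) (dizionario : List (String × Int)) (grado : Int) (antenati : Int) (radice : String) (out : List (String × Int)) : Decidable (Spec_prova22 file dizionario grado antenati radice out) := by unfold Spec_prova22; infer_instance

-- ===== CLAIM (what is proved, stated in full; the proofs are below) =====
def Claim_equal_prova22 : Prop := ∀ (file : List (String × List String)) (dizionario : List (String × Int)) (grado : Int) (antenati : Int) (radice : String), Dom_prova22 file dizionario grado antenati radice → Pre_prova22 file dizionario grado antenati radice → Spec_prova22 file dizionario grado antenati radice (prova22 file dizionario grado antenati radice)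

-- ===== LEMMAS AND PROOFS =====

-- fold a list of writes into the dict
def pvFold (d : PySem.Dict String Int) (l : List (String × Int)) : PySem.Dict String Int :=
  l.foldl (fun d p => d.insert p.1 p.2) d

-- the sequence of dict writes the recursion performs (fuel-indexed)
def pvW (file : PySem.Dict String (List String)) (grado : Int) : Nat → String → Int → List (String × Int)
  | 0, _, _ => []
  | f+1, n, dep =>
    match file.get? n with
    | none => []
    | some kids =>
      if (kids.length : Int) = grado then
        kids.map (fun c => (c, dep+1)) ++ (kids.map (fun c => pvW file grado f c (dep+1))).flatten
      else
        (kids.map (fun c => (c, dep) :: pvW file grado f c dep)).flatten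

-- fuel f suffices for the recursion from n, and no lookup misses
def pvOK (file : PySem.Dict String (List String)) : Nat → String → Bool
  | 0, _ => false
  | f+1, n =>
    match file.get? n with
    | none => false
    | some kids => kids.all (pvOK file f)

theorem pvFold_append (d : PySem.Dict String Int) (l1 l2 : List (String × Int)) :
    pvFold d (l1 ++ l2) = pvFold (pvFold d l1) l2 := by
  simp [pvFold, List.foldl_append]

theorem pvFold_pairs (d : PySem.Dict String Int) (kids : List String) (v : Int) :
    pvFold d (kids.map (fun c => (c, v))) = kids.foldl (fun d c => d.insert c v) d := by
  simp [pvFold, List.foldl_map]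

theorem pv_foldl_pvFold {g : PySem.Dict String Int → String → PySem.Dict String Int}
    {w : String → List (String × Int)} (h : ∀ d c, g d c = pvFold d (w c)) :
    ∀ (kids : List String) (d : PySem.Dict String Int),
      kids.foldl g d = pvFold d ((kids.map w).flatten) := by
  intro kids
  induction kids with
  | nil => intro d; simp [pvFold]
  | cons a t ih =>
    intro d
    simp only [List.foldl_cons, List.map_cons, List.flatten_cons]
    rw [pvFold_append, ← h, ih]

-- A's port computes exactly the fold of the write sequence
theorem pv_lemA (file : PySem.Dict String (List String)) (grado : Int) :
    ∀ (f : Nat) (d : PySem.Dict String Int) (antenati : Int) (radice : String),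
      prova22Rec file grado f d antenati radice = pvFold d (pvW file grado f radice antenati) := by
  intro f
  induction f with
  | zero => intro d a r; simp [prova22Rec, pvW, pvFold]
  | succ f ih =>
    intro d a r
    simp only [prova22Rec, pvW]
    cases hget : file.get? r with
    | none => simp [pvFold]
    | some kids =>
      simp only
      split
      · rw [pvFold_append, pvFold_pairs]
        exact pv_foldl_pvFold (fun d c => ih d (a+1) c) kids _
      · exact pv_foldl_pvFold (fun d c => by rw [ih (d.insert c a) a c]; rfl) kids d

-- any fuel finishes an empty stack
theorem pv_loop_nil (file : PySem.Dict String (List String)) (grado : Int) :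
    ∀ (k : Nat) (d : PySem.Dict String Int), prova22Loop file grado k [] d = d := by
  intro k d; cases k <;> rfl

-- processing the expand-tasks of a list of children
theorem pv_loop_children (file : PySem.Dict String (List String)) (grado : Int) (f : Nat) (dep : Int)
    (IH : ∀ (n : String) (rest : List PvTask) (d : PySem.Dict String Int) (fb : Nat),
        pvOK file f n = true →
        prova22Loop file grado (pvCost file grado f n + fb) (PvTask.expand n dep :: rest) d
          = prova22Loop file grado fb rest (pvFold d (pvW file grado f n dep))) :
    ∀ (kids : List String), (∀ c ∈ kids, pvOK file f c = true) →
      ∀ (rest : List PvTask) (d : PySem.Dict String Int) (fb : Nat),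
        prova22Loop file grado ((kids.map (pvCost file grado f)).sum + fb)
            (kids.foldr (fun c s => PvTask.expand c dep :: s) rest) d
          = prova22Loop file grado fb rest
              (pvFold d ((kids.map (fun c => pvW file grado f c dep)).flatten)) := by
  intro kids
  induction kids with
  | nil => intro _ rest d fb; simp [pvFold]
  | cons a t ih =>
    intro hall rest d fb
    simp only [List.map_cons, List.sum_cons, List.foldr_cons, List.flatten_cons]
    rw [Nat.add_assoc, IH a _ d _ (hall a (List.mem_cons_self))]
    rw [ih (fun c hc => hall c (List.mem_cons_of_mem a hc)) rest _ fb, pvFold_append]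

-- processing write+expand task pairs of a list of children
theorem pv_loop_children' (file : PySem.Dict String (List String)) (grado : Int) (f : Nat) (dep : Int)
    (IH : ∀ (n : String) (rest : List PvTask) (d : PySem.Dict String Int) (fb : Nat),
        pvOK file f n = true →
        prova22Loop file grado (pvCost file grado f n + fb) (PvTask.expand n dep :: rest) d
          = prova22Loop file grado fb rest (pvFold d (pvW file grado f n dep))) :
    ∀ (kids : List String), (∀ c ∈ kids, pvOK file f c = true) →
      ∀ (rest : List PvTask) (d : PySem.Dict String Int) (fb : Nat),
        prova22Loop file grado ((kids.map (fun c => 1 + pvCost file grado f c)).sum + fb)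
            (kids.foldr (fun c s => PvTask.write c dep :: PvTask.expand c dep :: s) rest) d
          = prova22Loop file grado fb rest
              (pvFold d ((kids.map (fun c => (c, dep) :: pvW file grado f c dep)).flatten)) := by
  intro kids
  induction kids with
  | nil => intro _ rest d fb; simp [pvFold]
  | cons a t ih =>
    intro hall rest d fb
    simp only [List.map_cons, List.sum_cons, List.foldr_cons, List.flatten_cons]
    have harith : 1 + pvCost file grado f a + (t.map (fun c => 1 + pvCost file grado f c)).sum + fb
        = (pvCost file grado f a + ((t.map (fun c => 1 + pvCost file grado f c)).sum + fb)) + 1 := by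
      omega
    rw [harith]
    show prova22Loop file grado _ _ _ = _
    rw [prova22Loop]
    rw [IH a _ (d.insert a dep) _ (hall a (List.mem_cons_self))]
    rw [ih (fun c hc => hall c (List.mem_cons_of_mem a hc)) rest _ fb, pvFold_append]
    rfl

-- B's loop, given exactly the fuel pvCost plus slack, pops the expand task of
-- an OK node and continues with the folded write sequence
theorem pv_lemB (file : PySem.Dict String (List String)) (grado : Int) :
    ∀ (f : Nat) (n : String) (dep : Int) (rest : List PvTask) (d : PySem.Dict String Int) (fb : Nat),
      pvOK file f n = true →
      prova22Loop file grado (pvCost file grado f n + fb) (PvTask.expand n dep :: rest) d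
        = prova22Loop file grado fb rest (pvFold d (pvW file grado f n dep)) := by
  intro f
  induction f with
  | zero => intro n dep rest d fb h; simp [pvOK] at h
  | succ f ih =>
    intro n dep rest d fb h
    simp only [pvOK] at h
    cases hget : file.get? n with
    | none => rw [hget] at h; simp at h
    | some kids =>
      rw [hget] at h
      simp only [List.all_eq_true] at h
      simp only [pvCost, pvW, hget]
      split
      · have harith : 1 + (kids.map (pvCost file grado f)).sum + fb
            = ((kids.map (pvCost file grado f)).sum + fb) + 1 := by omega
        rw [harith]
        show prova22Loop file grado _ _ _ = _
        rw [prova22Loop, hget]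
        simp only [*, if_pos]
        rw [pv_loop_children file grado f (dep+1) (fun n r d fb hok => ih n (dep+1) r d fb hok)
          kids (fun c hc => h c hc) rest _ fb]
        rw [pvFold_append, pvFold_pairs]
      · have harith : 1 + (kids.map (fun c => 1 + pvCost file grado f c)).sum + fb
            = ((kids.map (fun c => 1 + pvCost file grado f c)).sum + fb) + 1 := by omega
        rw [harith]
        show prova22Loop file grado _ _ _ = _
        rw [prova22Loop, hget]
        simp only [*]
        exact pv_loop_children' file grado f dep (fun n r d fb hok => ih n dep r d fb hok)
          kids (fun c hc => h c hc) rest d fb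

-- ---- tree combinatorics: Pre_ gives enough fuel (pvOK) ----

-- a chain of strict ancestors (most recent first) from the root down to n
def pvChain (file : PySem.Dict String (List String)) (radice : String) : List String → String → Prop
  | [], n => n = radice
  | m :: s, n => (∃ kids, file.get? m = some kids ∧ n ∈ kids) ∧ pvChain file radice s m

theorem pv_get?_mk_mem (file : List (String × List String)) :
    ∀ (n : String) (kids : List String),
      (PySem.Dict.mk file).get? n = some kids → (n, kids) ∈ file := by
  induction file with
  | nil => intro n kids h; simp [PySem.Dict.get?] at h
  | cons p rest ih =>
    obtain ⟨pk, pv⟩ := p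
    intro n kids h
    rw [PySem.Dict.get?_mk_cons] at h
    by_cases he : pk = n
    · simp [he] at h
      rw [← he, ← h]
      exact List.mem_cons_self
    · simp [he] at h
      exact List.mem_cons_of_mem _ (ih n kids h)

theorem pv_mem_keys_get? (file : List (String × List String)) :
    ∀ (n : String), n ∈ file.map Prod.fst →
      ∃ kids, (PySem.Dict.mk file).get? n = some kids := by
  induction file with
  | nil => intro n h; simp at h
  | cons p rest ih =>
    obtain ⟨pk, pv⟩ := p
    intro n h
    rw [PySem.Dict.get?_mk_cons]
    by_cases he : pk = n
    · exact ⟨pv, by simp [he]⟩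
    · simp [he]
      apply ih
      simp at h
      rcases h with h | h
      · exact absurd h.symm he
      · simpa using h

theorem pv_kids_subset (file : List (String × List String)) (n : String) (kids : List String)
    (h : (n, kids) ∈ file) : ∀ c ∈ kids, c ∈ (file.map Prod.snd).flatten := by
  intro c hc
  rw [List.mem_flatten]
  exact ⟨kids, List.mem_map.mpr ⟨(n, kids), h, rfl⟩, hc⟩

-- ---- closure combinatorics: Pre_ gives enough fuel (pvOK) ----

theorem pv_subset_step (file : List (String × List String)) (S : PySem.Set String) :
    ∀ x ∈ S, x ∈ pvStep file S := by
  intro x hx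
  exact (PySem.Set.mem_update _ _ _).mpr (Or.inl hx)

theorem pv_step_sub (file : List (String × List String)) (S : PySem.Set String)
    (B : List String) (hS : ∀ x ∈ S, x ∈ B)
    (hflat : ∀ x ∈ (file.map Prod.snd).flatten, x ∈ B) :
    ∀ x ∈ pvStep file S, x ∈ B := by
  intro x hx
  rcases (PySem.Set.mem_update _ _ _).mp hx with hx | hx
  · exact hS x hx
  · apply hflat
    rw [List.mem_flatten] at hx ⊢
    obtain ⟨l, hl, hxl⟩ := hx
    rw [List.mem_map] at hl
    obtain ⟨p, hp, rfl⟩ := hl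
    exact ⟨p.2, List.mem_map.mpr ⟨p, List.mem_of_mem_filter hp, rfl⟩, hxl⟩

theorem pv_nodup_step (file : List (String × List String)) (S : PySem.Set String)
    (h : S.Nodup) : (pvStep file S).Nodup :=
  PySem.Set.nodup_update _ _ h

theorem pv_step_append (file : List (String × List String)) (S : PySem.Set String) :
    ∃ extra, pvStep file S = S ++ extra := by
  exact ⟨_, PySem.Set.update_eq_append_filter ..⟩

theorem pv_it_nodup (file : List (String × List String)) (S : PySem.Set String)
    (h : S.Nodup) : ∀ k, ((pvStep file)^[k] S).Nodup := by
  intro k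
  induction k with
  | zero => simpa
  | succ k ih => rw [Function.iterate_succ_apply']; exact pv_nodup_step file _ ih

theorem pv_it_sub (file : List (String × List String)) (S : PySem.Set String)
    (B : List String) (hS : ∀ x ∈ S, x ∈ B)
    (hflat : ∀ x ∈ (file.map Prod.snd).flatten, x ∈ B) :
    ∀ k, ∀ x ∈ (pvStep file)^[k] S, x ∈ B := by
  intro k
  induction k with
  | zero => simpa
  | succ k ih => rw [Function.iterate_succ_apply']; exact pv_step_sub file _ B ih hflat

theorem pv_it_supset (file : List (String × List String)) (S : PySem.Set String) :
    ∀ k, ∀ x ∈ S, x ∈ (pvStep file)^[k] S := by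
  intro k
  induction k with
  | zero => simp
  | succ k ih =>
    intro x hx
    rw [Function.iterate_succ_apply']
    exact pv_subset_step file _ x (ih x hx)

theorem pv_it_fix (file : List (String × List String)) (S : PySem.Set String)
    (h : pvStep file S = S) : ∀ j, (pvStep file)^[j] S = S := by
  intro j
  induction j with
  | zero => rfl
  | succ j ih => rw [Function.iterate_succ_apply', ih, h]

theorem pv_it_grow (file : List (String × List String)) (S : PySem.Set String)
    (K : Nat) (h : ∀ i < K, pvStep file ((pvStep file)^[i] S) ≠ (pvStep file)^[i] S) :
    ∀ j ≤ K, S.length + j ≤ ((pvStep file)^[j] S).length := by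
  intro j
  induction j with
  | zero => simp
  | succ j ih =>
    intro hj
    have hne := h j (by omega)
    obtain ⟨extra, he⟩ := pv_step_append file ((pvStep file)^[j] S)
    have hex : extra ≠ [] := by
      intro hnil
      rw [hnil, List.append_nil] at he
      exact hne he
    have : 1 ≤ extra.length := List.length_pos_iff.mpr hex
    have hlen := ih (by omega)
    rw [Function.iterate_succ_apply', he, List.length_append]
    omega

theorem pv_saturate (file : List (String × List String)) (S : PySem.Set String)
    (B : List String) (hnd : S.Nodup) (hS : ∀ x ∈ S, x ∈ B)
    (hflat : ∀ x ∈ (file.map Prod.snd).flatten, x ∈ B)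
    (K : Nat) (hK : B.length + 1 ≤ S.length + K) :
    pvStep file ((pvStep file)^[K] S) = (pvStep file)^[K] S := by
  by_cases hfix : ∃ i, i ≤ K ∧ pvStep file ((pvStep file)^[i] S) = (pvStep file)^[i] S
  · obtain ⟨i, hiK, hfi⟩ := hfix
    have hdecomp : (pvStep file)^[K] S = (pvStep file)^[i] S := by
      rw [show K = (K - i) + i by omega, Function.iterate_add_apply]
      exact pv_it_fix file _ hfi (K - i)
    rw [hdecomp, hfi]
  · exfalso
    push_neg at hfix
    have hgrow := pv_it_grow file S K (fun i hi => hfix i (by omega)) K (le_refl K)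
    have hbound : ((pvStep file)^[K] S).length ≤ B.length := by
      have h1 := pv_it_nodup file S hnd K
      have h2 : (pvStep file)^[K] S ⊆ B := fun {x} hx => pv_it_sub file S B hS hflat K x hx
      exact (h1.subperm h2).length_le
    omega

theorem pv_closed_of_fix (file : List (String × List String)) (T : PySem.Set String)
    (hfix : pvStep file T = T) (n : String) (kids : List String) (hn : n ∈ T)
    (hget : (PySem.Dict.mk file).get? n = some kids) : ∀ c ∈ kids, c ∈ T := by
  intro c hc
  rw [← hfix]
  apply (PySem.Set.mem_update _ _ _).mpr
  right
  rw [List.mem_flatten]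
  refine ⟨kids, List.mem_map.mpr ⟨(n, kids), ?_, rfl⟩, hc⟩
  rw [List.mem_filter]
  exact ⟨pv_get?_mk_mem file n kids hget, (PySem.Set.contains_iff _ _).mpr hn⟩

theorem pv_reach_fix (file : List (String × List String)) (radice : String) :
    pvStep file (pvReach file radice) = pvReach file radice := by
  apply pv_saturate file _ (radice :: (file.map Prod.snd).flatten)
  · exact PySem.Set.nodup_ofList _
  · intro x hx
    have := (PySem.Set.mem_ofList _ _).mp hx
    simp at this
    simp [this]
  · intro x hx; exact List.mem_cons_of_mem _ hx
  · have : radice ∈ PySem.Set.ofList [radice] := (PySem.Set.mem_ofList _ _).mpr (by simp)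
    have hpos : 0 < (PySem.Set.ofList [radice]).length := List.length_pos_of_mem this
    simp only [List.length_cons]
    omega

theorem pv_desc_fix (file : List (String × List String)) (n0 : String) :
    pvStep file (pvDesc file n0) = pvDesc file n0 := by
  apply pv_saturate file _ ((file.map Prod.snd).flatten)
  · exact PySem.Set.nodup_ofList _
  · intro x hx
    have hx' := (PySem.Set.mem_ofList _ _).mp hx
    cases hget : (PySem.Dict.mk file).get? n0 with
    | none => rw [hget] at hx'; simp at hx'
    | some kids =>
      rw [hget] at hx'
      exact pv_kids_subset file n0 kids (pv_get?_mk_mem file n0 kids hget) x hx'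
  · intro x hx; exact hx
  · omega

theorem pv_radice_mem_reach (file : List (String × List String)) (radice : String) :
    radice ∈ pvReach file radice := by
  apply pv_it_supset
  exact (PySem.Set.mem_ofList _ _).mpr (by simp)

theorem pv_kids_sub_desc (file : List (String × List String)) (n : String) (kids : List String)
    (hget : (PySem.Dict.mk file).get? n = some kids) : ∀ c ∈ kids, c ∈ pvDesc file n := by
  intro c hc
  apply pv_it_supset
  apply (PySem.Set.mem_ofList _ _).mpr
  rw [hget]
  exact hc

theorem pv_chain_reach (file : List (String × List String)) (radice : String) :
    ∀ (seen : List String) (n : String), pvChain (PySem.Dict.mk file) radice seen n →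
      ∀ x ∈ n :: seen, x ∈ pvReach file radice := by
  intro seen
  induction seen with
  | nil =>
    intro n h x hx
    rw [pvChain] at h
    subst h
    simp at hx
    exact hx ▸ pv_radice_mem_reach file n
  | cons m s ih =>
    intro n h x hx
    rw [pvChain] at h
    obtain ⟨⟨kids, hget, hn⟩, hchain⟩ := h
    rcases List.mem_cons.mp hx with rfl | hx
    · exact pv_closed_of_fix file _ (pv_reach_fix file radice) m kids
        (ih m hchain m List.mem_cons_self) hget x hn
    · exact ih m hchain x hx

theorem pv_chain_desc (file : List (String × List String)) (radice : String) :
    ∀ (seen : List String) (n : String), pvChain (PySem.Dict.mk file) radice seen n →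
      ∀ x ∈ seen, n ∈ pvDesc file x := by
  intro seen
  induction seen with
  | nil => intro n _ x hx; simp at hx
  | cons m s ih =>
    intro n h x hx
    rw [pvChain] at h
    obtain ⟨⟨kids, hget, hn⟩, hchain⟩ := h
    rcases List.mem_cons.mp hx with rfl | hx
    · exact pv_kids_sub_desc file x kids hget n hn
    · exact pv_closed_of_fix file _ (pv_desc_fix file x) m kids (ih m hchain x hx) hget n hn

theorem pv_chain_nodup (file : List (String × List String)) (radice : String)
    (hacyc : ∀ n ∈ pvReach file radice, n ∉ pvDesc file n) :
    ∀ (seen : List String) (n : String), pvChain (PySem.Dict.mk file) radice seen n →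
      (n :: seen).Nodup := by
  intro seen
  induction seen with
  | nil => intro n _; exact List.nodup_singleton _
  | cons m s ih =>
    intro n h
    have h' := h
    rw [pvChain] at h'
    obtain ⟨⟨kids, hget, hn⟩, hchain⟩ := h'
    refine List.nodup_cons.mpr ⟨?_, ih m hchain⟩
    intro hin
    exact hacyc n (pv_chain_reach file radice (m :: s) n h n List.mem_cons_self)
      (pv_chain_desc file radice (m :: s) n h n hin)

theorem pv_chain_length (file : List (String × List String)) (radice : String)
    (hacyc : ∀ n ∈ pvReach file radice, n ∉ pvDesc file n) :
    ∀ (seen : List String) (n : String), pvChain (PySem.Dict.mk file) radice seen n →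
      (n :: seen).length ≤ ((file.map Prod.snd).flatten).length + 1 := by
  intro seen n h
  have hnd := pv_chain_nodup file radice hacyc seen n h
  have hsub : (n :: seen) ⊆ radice :: (file.map Prod.snd).flatten := by
    intro x hx
    have hxR := pv_chain_reach file radice seen n h x hx
    exact pv_it_sub file _ (radice :: (file.map Prod.snd).flatten)
      (by intro y hy; have := (PySem.Set.mem_ofList _ _).mp hy; simp at this; simp [this])
      (fun y hy => List.mem_cons_of_mem _ hy) _ x hxR
  simpa using (hnd.subperm hsub).length_le

theorem pv_ok_of_chain (file : List (String × List String)) (radice : String)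
    (hkeys : ∀ n ∈ pvReach file radice, n ∈ file.map Prod.fst)
    (hacyc : ∀ n ∈ pvReach file radice, n ∉ pvDesc file n) :
    ∀ (f : Nat) (seen : List String) (n : String),
      pvChain (PySem.Dict.mk file) radice seen n →
      ((file.map Prod.snd).flatten).length + 2 ≤ f + seen.length + 1 →
      pvOK (PySem.Dict.mk file) f n = true := by
  intro f
  induction f with
  | zero =>
    intro seen n hchain hlen
    exfalso
    have := pv_chain_length file radice hacyc seen n hchain
    simp only [List.length_cons] at this
    omega
  | succ f ih =>
    intro seen n hchain hlen
    have hnk : n ∈ file.map Prod.fst :=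
      hkeys n (pv_chain_reach file radice seen n hchain n List.mem_cons_self)
    obtain ⟨kids, hget⟩ := pv_mem_keys_get? file n hnk
    rw [pvOK, hget]
    rw [List.all_eq_true]
    intro c hc
    exact ih (n :: seen) c ⟨⟨kids, hget, hc⟩, hchain⟩ (by simp only [List.length_cons]; omega)

-- ===== VERDICT (by name: the statement is the Claim_ definition above) =====
theorem prova22_spec : Claim_equal_prova22 := by
  intro file dizionario grado antenati radice _ hpre
  obtain ⟨hr, hkeys, hacyc⟩ := hpre
  unfold Spec_prova22 prova22 prova22_alt
  have hN : ((file.map Prod.snd).flatten).length = (file.map (fun p => p.2.length)).sum := by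
    rw [List.length_flatten, List.map_map]; rfl
  have hok : pvOK (PySem.Dict.mk file) ((file.map (fun p => p.2.length)).sum + 2) radice = true := by
    apply pv_ok_of_chain file radice hkeys hacyc _ [] radice rfl
    simp only [List.length_nil, hN]
    omega
  rw [pv_lemA]
  rw [pv_lemB (PySem.Dict.mk file) grado _ radice antenati [] (PySem.Dict.mk dizionario) 1 hok]
  rw [pv_loop_nil]
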